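-- pv_equiv track=rewrite | github.com/portkeyss/coding-buster | 1023-camelcase-matching/1023-camelcase-matching.py | camelMatch
-- ===== SOURCE A (Python) =====
-- from typing import List
--
-- def camelMatch(queries: List[str], pattern: str) -> List[bool]:
--     def check(q,p):
--         m,n = len(q),len(p)
--         i = j = 0
--         while i<m and j<n:
--             if q[i]==p[j]:
--                 i+=1
--                 j+=1
--             elif q[i].isupper():
--                 return False
--             else:
--                 i+=1
--         if i==m: return j==n
--         while i<m and q[i].islower():
--             i += 1
--         return i==m
--
--     return map(lambda x:check(x,pattern), queries)
-- ===== SOURCE B (Python) =====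
-- import re
--
-- def camelMatch(queries, pattern):
--     # one deterministic regex per pattern char c: '[^A-Zc]*c' skips chars that are neither
--     # uppercase nor c, then matches the literal c; a query matches iff the segment regexes
--     # consume it in order and the leftover is all '[a-z]*'
--     compiled = {c: re.compile("[^A-Z" + re.escape(c) + "]*" + re.escape(c)) for c in set(pattern)}
--     segs = [compiled[c] for c in pattern]
--     tail = re.compile("[a-z]*")
--
--     def match(q):
--         pos = 0
--         for rx in segs:
--             m = rx.match(q, pos)
--             if not m:
--                 return False
--             pos = m.end()
--         return tail.match(q, pos).end() == len(q)
--
--     return map(match, queries)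
-- ===== Notes on version B (the rewrite author's own statement) =====
-- stated objective: alternative
-- what changed: Replaces A's hand-written two-index scan by regex matching: one deterministic compiled regex '[^A-Zc]*c' per pattern char run in order over each query, then a '[a-z]*' tail check.
import Mathlib
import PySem

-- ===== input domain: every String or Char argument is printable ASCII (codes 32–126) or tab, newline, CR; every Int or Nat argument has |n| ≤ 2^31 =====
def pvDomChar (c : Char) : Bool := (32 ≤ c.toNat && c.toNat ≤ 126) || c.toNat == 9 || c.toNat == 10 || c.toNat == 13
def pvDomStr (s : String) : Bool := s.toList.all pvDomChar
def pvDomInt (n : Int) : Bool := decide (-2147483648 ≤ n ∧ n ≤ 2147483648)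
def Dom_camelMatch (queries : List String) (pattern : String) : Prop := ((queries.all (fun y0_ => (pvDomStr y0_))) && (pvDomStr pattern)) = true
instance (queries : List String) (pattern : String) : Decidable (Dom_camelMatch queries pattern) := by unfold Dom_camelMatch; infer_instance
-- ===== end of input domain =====

-- B compiles one deterministic regex '[^A-Zc]*c' per pattern char c and matches each query by running
-- them in order, then checks the leftover with '[a-z]*', instead of A's hand-written two-index scan.
-- Both ports mirror the Pythons' lazy 'map' return by producing the list of per-query booleans; return value only.
-- ===== PORT A =====
-- the trailing loop: while i<m and q[i].islower(): i+=1 ; return i==m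
def camelSkipLoop (q : List Char) (m i : Nat) : Bool :=
  if _h : i < m ∧ PySem.Chars.islower (q.getD i ' ') then
    camelSkipLoop q m (i+1)
  else decide (i = m)
termination_by m - i

-- the main while-loop: while i<m and j<n: ...
def camelCheckLoop (q p : List Char) (m n i j : Nat) : Bool :=
  if h : i < m ∧ j < n then
    if q.getD i ' ' == p.getD j ' ' then
      camelCheckLoop q p m n (i+1) (j+1)
    else if PySem.Chars.isupper (q.getD i ' ') then
      false
    else
      camelCheckLoop q p m n (i+1) j
  else
    -- code after the loop: if i==m: return j==n ; then the trailing skip-loop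
    if i = m then decide (j = n)
    else camelSkipLoop q m i
termination_by m - i

def camelCheck (q p : List Char) : Bool :=
  camelCheckLoop q p q.length p.length 0 0

def camelMatch (queries : List String) (pattern : String) : List Bool :=
  queries.map (fun x => camelCheck x.toList pattern.toList)

-- ===== PORT B =====
-- Hand-written port of Python's re engine on exactly the regexes Source B compiles (exact there):
-- rxSeg is 'segs[c].match(q, pos)' — the star of '[^A-Zc]*c' consumes chars that are neither uppercase
-- nor c, then the literal c must match; deterministic (no backtracking possible on this shape);
-- the consumed-so-far position 'pos' is represented by returning the remaining suffix.
def rxSeg (c : Char) : List Char → Option (List Char)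
  | [] => none
  | e :: q =>
    if e == c then some q
    else if !(decide ('A' ≤ e) && decide (e ≤ 'Z')) then rxSeg c q
    else none

-- Source B's match(): run the segment regexes in pattern order, then 'tail.match(q, pos).end() == len(q)'
-- — the tail '[a-z]*' must consume the entire remainder.
def rxFullmatch (p q : List Char) : Bool :=
  match p with
  | [] => q.all (fun e => decide ('a' ≤ e) && decide (e ≤ 'z'))
  | c :: p' =>
    match rxSeg c q with
    | none => false
    | some q' => rxFullmatch p' q'

def camelMatch_alt (queries : List String) (pattern : String) : List Bool :=
  queries.map (fun x => rxFullmatch pattern.toList x.toList)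

-- ===== PRECONDITION & SPEC =====
def Spec_camelMatch (queries : List String) (pattern : String) (out : List Bool) : Prop := out = camelMatch_alt queries pattern
instance (queries : List String) (pattern : String) (out : List Bool) : Decidable (Spec_camelMatch queries pattern out) := by unfold Spec_camelMatch; infer_instance

-- ===== CLAIM (what is proved, stated in full; the proofs are below) =====
def Claim_equal_camelMatch : Prop := ∀ (queries : List String) (pattern : String), Dom_camelMatch queries pattern → Spec_camelMatch queries pattern (camelMatch queries pattern)

-- ===== LEMMAS AND PROOFS =====

-- proof-side intermediate: the symmetric structural recursion on both suffixes
def camelMatchB : List Char → List Char → Bool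
  | q, [] => q.all PySem.Chars.islower
  | [], _ :: _ => false
  | c :: q', d :: p' =>
    if c == d then camelMatchB q' p'
    else if PySem.Chars.isupper c then false
    else camelMatchB q' (d :: p')

-- the regex matcher computes the same structural recursion (the char classes ARE isupper/islower)
theorem rx_eq_B (q p : List Char) : rxFullmatch p q = camelMatchB q p := by
  induction q generalizing p with
  | nil => cases p <;> simp [rxFullmatch, rxSeg, camelMatchB]
  | cons c q' ih =>
    cases p with
    | nil => rfl
    | cons d p' =>
      rw [camelMatchB, rxFullmatch]
      by_cases he : c == d
      · simp [rxSeg, he, ih]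
      · by_cases hu : PySem.Chars.isupper c
        · have hu' : (decide ('A' ≤ c) && decide (c ≤ 'Z')) = true := hu
          simp [rxSeg, he, hu', hu]
        · have hu' : (decide ('A' ≤ c) && decide (c ≤ 'Z')) = false :=
            Bool.not_eq_true _ ▸ hu
          rw [if_neg he, if_neg hu, ← ih (d :: p')]
          simp only [rxSeg, he, hu', Bool.not_false, if_true]
          rfl

-- skip-loop computes: remaining suffix is all-lowercase
theorem skipLoop_eq (q : List Char) (i : Nat) (hi : i ≤ q.length) :
    camelSkipLoop q q.length i = (q.drop i).all PySem.Chars.islower := by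
  rw [camelSkipLoop]
  by_cases h : i < q.length
  · have hd : q.drop i = q[i] :: q.drop (i + 1) := List.drop_eq_getElem_cons h
    have hg : q.getD i ' ' = q[i] := List.getD_eq_getElem q ' ' h
    rw [hd, List.all_cons, hg]
    by_cases hl : PySem.Chars.islower q[i]
    · simp only [h, and_self, hl, Bool.true_and]
      exact skipLoop_eq q (i + 1) h
    · simp only [hl]
      simp [Nat.ne_of_lt h]
  · have hi' : i = q.length := Nat.le_antisymm hi (Nat.not_lt.mp h)
    simp [hi']
termination_by q.length - i

-- main-loop invariant: the index loop computes the structural recursion on suffixes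
theorem loop_eq (q p : List Char) (i j : Nat) (hi : i ≤ q.length) (hj : j ≤ p.length) :
    camelCheckLoop q p q.length p.length i j = camelMatchB (q.drop i) (p.drop j) := by
  rw [camelCheckLoop]
  by_cases hq : i < q.length
  · have hdq : q.drop i = q[i] :: q.drop (i + 1) := List.drop_eq_getElem_cons hq
    have hgq : q.getD i ' ' = q[i] := List.getD_eq_getElem q ' ' hq
    by_cases hp : j < p.length
    · have hdp : p.drop j = p[j] :: p.drop (j + 1) := List.drop_eq_getElem_cons hp
      have hgp : p.getD j ' ' = p[j] := List.getD_eq_getElem p ' ' hp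
      rw [hdq, hdp, camelMatchB, hgq, hgp]
      simp only [hq, hp, and_self, dif_pos]
      by_cases he : q[i] == p[j]
      · rw [if_pos he, if_pos he]
        exact loop_eq q p (i + 1) (j + 1) hq hp
      · rw [if_neg he, if_neg he]
        by_cases hu : PySem.Chars.isupper q[i]
        · rw [if_pos hu, if_pos hu]
        · rw [if_neg hu, if_neg hu, ← hdp]
          exact loop_eq q p (i + 1) j hq hj
    · have hj' : j = p.length := Nat.le_antisymm hj (Nat.not_lt.mp hp)
      have hdp : p.drop j = [] := by simp [hj']
      rw [hdp, camelMatchB]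
      simp only [hp, and_false, dif_neg, not_false_iff]
      rw [if_neg (Nat.ne_of_lt hq)]
      exact skipLoop_eq q i hi
  · have hi' : i = q.length := Nat.le_antisymm hi (Nat.not_lt.mp hq)
    have hdq : q.drop i = [] := by simp [hi']
    by_cases hp : j < p.length
    · have hdp : p.drop j = p[j] :: p.drop (j + 1) := List.drop_eq_getElem_cons hp
      rw [hdq, hdp, camelMatchB]
      simp [hi', Nat.ne_of_lt hp]
    · have hj' : j = p.length := Nat.le_antisymm hj (Nat.not_lt.mp hp)
      rw [hdq]
      simp [hi', hj', camelMatchB]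
termination_by q.length - i

-- ===== VERDICT (by name: the statement is the Claim_ definition above) =====
theorem camelMatch_spec : Claim_equal_camelMatch := by
  intro queries pattern _
  unfold Spec_camelMatch camelMatch camelMatch_alt
  refine List.map_congr_left fun x _ => ?_
  have := loop_eq x.toList pattern.toList 0 0 (Nat.zero_le _) (Nat.zero_le _)
  simpa [camelCheck, rx_eq_B] using this
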